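-- pv_equiv track=rewrite | github.com/InslyAI/insly-openapi-mcp-server | insly/openapi_mcp_server/utils/tool_naming.py | extract_resource_from_path
-- ===== SOURCE A (Python) =====
-- def extract_resource_from_path(path: str) -> str:
--     """Extract the main resource name from an API path.
--
--     Args:
--         path: API path (e.g., '/api/v1/users/{id}/posts')
--
--     Returns:
--         str: Extracted resource name (e.g., 'posts')
--     """
--     # Remove leading slash and split by /
--     parts = path.strip('/').split('/')
--
--     # Filter out common API prefixes and parameters
--     filtered_parts = []
--     for part in parts:
--         # Skip version indicators, 'api', and path parameters
--         if (not part.startswith('v') or not part[1:].isdigit()) and \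
--            part != 'api' and \
--            not (part.startswith('{') and part.endswith('}')):
--             filtered_parts.append(part)
--
--     # Return the last meaningful part, or the second-to-last if the last is a parameter
--     if filtered_parts:
--         return filtered_parts[-1]
--
--     # Fallback: try to find any non-parameter part
--     for part in reversed(parts):
--         if not (part.startswith('{') and part.endswith('}')) and part != 'api':
--             return part
--
--     return 'resource'
-- ===== SOURCE B (Python) =====
-- def extract_resource_from_path(path: str) -> str:
--     """Extract the main resource name from an API path.
--
--     Works directly on the string: repeatedly rpartition('/') to chop the last
--     segment off, right to left, returning early at the first segment that is
--     neither a parameter, 'api', nor a version token; remembers the first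
--     otherwise-acceptable segment as a fallback. Never builds a segment list.
--     """
--     s = path.strip('/')
--     fallback = None
--     while True:
--         head, sep, part = s.rpartition('/')
--         if not (part.startswith('{') and part.endswith('}')) and part != 'api':
--             if not (part.startswith('v') and part[1:].isdigit()):
--                 return part
--             if fallback is None:
--                 fallback = part
--         if not sep:
--             break
--         s = head
--     return fallback if fallback is not None else 'resource'
-- ===== Notes on version B (the rewrite author's own statement) =====
-- stated objective: alternative
-- what changed: B never splits the path into a segment list: it chops segments off the string right-to-left with str.rpartition on the slash separator, returning early at the first acceptable non-version segment and remembering the first acceptable segment as fallback, instead of A's build-filtered-list-take-last plus second reversed scan.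
import Mathlib
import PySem

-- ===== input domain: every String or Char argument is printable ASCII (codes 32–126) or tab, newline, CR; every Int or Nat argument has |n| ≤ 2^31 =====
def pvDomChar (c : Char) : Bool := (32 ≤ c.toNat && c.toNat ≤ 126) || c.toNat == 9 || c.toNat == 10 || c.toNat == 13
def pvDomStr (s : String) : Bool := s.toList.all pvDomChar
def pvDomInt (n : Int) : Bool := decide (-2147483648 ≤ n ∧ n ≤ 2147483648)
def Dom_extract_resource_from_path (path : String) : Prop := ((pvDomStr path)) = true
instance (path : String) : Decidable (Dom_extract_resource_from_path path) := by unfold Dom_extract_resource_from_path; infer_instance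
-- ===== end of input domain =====

-- B chops segments off the path string right-to-left with str.rpartition on the slash separator,
-- returning early, instead of A's split-into-list + filtered-list-take-last + second reversed scan (objective: alternative).

-- shared predicate helpers (the same Python boolean expressions occur in both programs)
-- part.startswith('{') and part.endswith('}')
def pvIsParam (part : String) : Bool :=
  PySem.Str.startswith part "{" && PySem.Str.endswith part "}"
-- part.startswith('v') and part[1:].isdigit()
def pvIsVersion (part : String) : Bool :=
  PySem.Str.startswith part "v" && PySem.Str.strIsdigit (PySem.Str.slice part (some 1) none)
-- not (param) and part != 'api'   (A's fallback test; B's outer test)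
def pvOk (part : String) : Bool := !pvIsParam part && part != "api"
-- A's compound filter test, in A's order
def pvCondA (part : String) : Bool :=
  (!PySem.Str.startswith part "v" || !PySem.Str.strIsdigit (PySem.Str.slice part (some 1) none))
    && part != "api" && !pvIsParam part

-- ===== PORT A =====
def extract_resource_from_path (path : String) : String :=
  let parts := (PySem.Str.split? (PySem.Str.stripChars path "/") "/").getD []
  let filtered := parts.foldl (fun acc part => if pvCondA part then acc ++ [part] else acc) []
  if h : filtered ≠ [] then filtered.getLast h
  else
    match parts.reverse.find? (fun part => pvOk part) with
    | some part => part
    | none => "resource"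

-- ===== PORT B =====
-- s.rpartition on the slash separator, on the char list: none = separator absent;
-- some (head, part) = (text before the last '/', text after it).
def pvRpartition (cs : List Char) : Option (List Char × List Char) :=
  match cs.reverse.dropWhile (· ≠ '/') with
  | [] => none
  | _ :: t => some (t.reverse, (cs.reverse.takeWhile (· ≠ '/')).reverse)

theorem pvRpartition_length {cs head p : List Char}
    (h : pvRpartition cs = some (head, p)) : head.length < cs.length := by
  unfold pvRpartition at h
  rcases hd : cs.reverse.dropWhile (· ≠ '/') with - | ⟨x, t⟩
  · rw [hd] at h; exact absurd h (by simp)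
  · rw [hd] at h
    have h1 : head = t.reverse := by cases h; rfl
    have h2 : (x :: t).length ≤ cs.length := by
      have := (List.dropWhile_sublist (l := cs.reverse) (p := (· ≠ '/'))).length_le
      rw [hd] at this; simpa using this
    simp only [h1, List.length_reverse]
    simp at h2; omega

-- the while loop of Source B: process the last segment, early-return on a primary hit,
-- remember the first acceptable (version) segment in fb, then chop and continue
def pvChop (cs : List Char) (fb : Option String) : String :=
  match h : pvRpartition cs with
  | none =>
      let part := String.ofList cs
      if pvOk part then
        if !pvIsVersion part then part else fb.getD part
      else fb.getD "resource"
  | some (head, p) =>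
      let part := String.ofList p
      if pvOk part then
        if !pvIsVersion part then part
        else pvChop head (some (fb.getD part))
      else pvChop head fb
termination_by cs.length
decreasing_by all_goals exact pvRpartition_length h

def extract_resource_from_path_alt (path : String) : String :=
  pvChop (PySem.Str.stripChars path "/").toList none

-- ===== PRECONDITION & SPEC =====
def Spec_extract_resource_from_path (path : String) (out : String) : Prop := out = extract_resource_from_path_alt path
instance (path : String) (out : String) : Decidable (Spec_extract_resource_from_path path out) := by unfold Spec_extract_resource_from_path; infer_instance

-- ===== CLAIM (what is proved, stated in full; the proofs are below) =====
def Claim_equal_extract_resource_from_path : Prop := ∀ (path : String), Dom_extract_resource_from_path path → Spec_extract_resource_from_path path (extract_resource_from_path path)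

-- ===== LEMMAS AND PROOFS =====

theorem pvCondA_eq (part : String) : pvCondA part = (pvOk part && !pvIsVersion part) := by
  simp only [pvCondA, pvOk, pvIsVersion]
  generalize PySem.Str.startswith part "v" = a
  generalize PySem.Str.strIsdigit (PySem.Str.slice part (some 1) none) = b
  generalize pvIsParam part = c
  generalize (part != "api") = d
  revert a b c d
  decide

-- clean structural form of splitting on '/'
def pvSplitAux (l : List Char) (cur : List Char) : List (List Char) :=
  match l with
  | [] => [cur.reverse]
  | c :: rest => if c = '/' then cur.reverse :: pvSplitAux rest [] else pvSplitAux rest (c :: cur)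

theorem pvGo_eq (fuel : Nat) (l cur : List Char) (acc : List (List Char)) (hf : l.length ≤ fuel) :
    PySem.Chars.splitOn.go ['/'] fuel l cur acc = acc.reverse ++ pvSplitAux l cur := by
  induction fuel generalizing l cur acc with
  | zero =>
    have : l = [] := List.length_eq_zero_iff.mp (Nat.le_zero.mp hf)
    subst this
    simp [PySem.Chars.splitOn.go, pvSplitAux]
  | succ n ih =>
    cases l with
    | nil => simp [PySem.Chars.splitOn.go, pvSplitAux]
    | cons c rest =>
      by_cases hc : c = '/'
      · subst hc
        have hpre : ['/'].isPrefixOf ('/' :: rest) = true := by simp [List.isPrefixOf]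
        simp only [PySem.Chars.splitOn.go, hpre, if_pos]
        have hdrop : List.drop ['/'].length ('/' :: rest) = rest := by simp
        rw [hdrop, ih rest [] (cur.reverse :: acc) (by simpa using Nat.le_of_succ_le_succ hf)]
        simp [pvSplitAux]
      · have hpre : ['/'].isPrefixOf (c :: rest) = false := by
          simp only [List.isPrefixOf, Bool.and_eq_false_iff, beq_eq_false_iff_ne]
          exact Or.inl fun e => hc e.symm
        simp only [PySem.Chars.splitOn.go, hpre]
        rw [if_neg (by simp)]
        rw [ih rest (c :: cur) acc (by simpa using Nat.le_of_succ_le_succ hf)]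
        simp [pvSplitAux, hc]

theorem pvSplitOn_eq (cs : List Char) : PySem.Chars.splitOn cs ['/'] = pvSplitAux cs [] := by
  unfold PySem.Chars.splitOn
  rw [pvGo_eq (cs.length + 1) cs [] [] (Nat.le_succ _)]
  simp

theorem pvSplitAux_no_sep (l cur : List Char) (h : '/' ∉ l) :
    pvSplitAux l cur = [cur.reverse ++ l] := by
  induction l generalizing cur with
  | nil => simp [pvSplitAux]
  | cons c rest ih =>
    have hc : c ≠ '/' := fun e => h (e ▸ List.mem_cons_self)
    rw [pvSplitAux, if_neg hc, ih _ (fun m => h (List.mem_cons_of_mem _ m))]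
    simp

theorem pvSplitAux_append (h p cur : List Char) :
    pvSplitAux (h ++ '/' :: p) cur = pvSplitAux h cur ++ pvSplitAux p [] := by
  induction h generalizing cur with
  | nil => simp [pvSplitAux]
  | cons c rest ih =>
    by_cases hc : c = '/'
    · subst hc; simp [pvSplitAux, ih]
    · simp [pvSplitAux, hc, ih]

theorem pvDropWhile_head_sep {l : List Char} {x : Char} {t : List Char}
    (hd : List.dropWhile (fun c => decide (c ≠ '/')) l = x :: t) : x = '/' := by
  have h2 := List.head?_dropWhile_not (p := fun c => decide (c ≠ '/')) (l := l)
  rw [hd] at h2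
  simpa using h2

theorem pvRpartition_none_iff (cs : List Char) : pvRpartition cs = none ↔ '/' ∉ cs := by
  unfold pvRpartition
  rcases hd : cs.reverse.dropWhile (· ≠ '/') with - | ⟨x, t⟩
  · simp only [List.dropWhile_eq_nil_iff] at hd
    simp only [true_iff]
    intro hm
    have := hd '/' (by simpa using hm)
    simp at this
  · simp only [reduceCtorEq, false_iff, not_not]
    have hx : x ∈ cs.reverse.dropWhile (· ≠ '/') := by rw [hd]; exact List.mem_cons_self
    have hx' : x ∈ cs := by simpa using (List.dropWhile_sublist _).mem hx
    have hxe : x = '/' := pvDropWhile_head_sep (by simpa using hd)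
    exact hxe ▸ hx'

theorem pvRpartition_some {cs head p : List Char} (h : pvRpartition cs = some (head, p)) :
    cs = head ++ '/' :: p ∧ '/' ∉ p := by
  unfold pvRpartition at h
  rcases hd : cs.reverse.dropWhile (· ≠ '/') with - | ⟨x, t⟩
  · rw [hd] at h; exact absurd h (by simp)
  · rw [hd] at h
    have h1 : head = t.reverse := by cases h; rfl
    have h2 : p = (cs.reverse.takeWhile (· ≠ '/')).reverse := by cases h; rfl
    have hxe : x = '/' := pvDropWhile_head_sep (by simpa using hd)
    have hsplit : cs.reverse = cs.reverse.takeWhile (· ≠ '/') ++ x :: t := by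
      rw [← hd, List.takeWhile_append_dropWhile]
    constructor
    · have h3 := congrArg List.reverse hsplit
      rw [List.reverse_reverse] at h3
      rw [h3, h1, h2, hxe]
      simp
    · intro hm
      rw [h2] at hm
      have := List.mem_takeWhile_imp (by simpa using hm)
      simp at this

theorem pvHead?_filter {α : Type} (p : α → Bool) (l : List α) :
    (l.filter p).head? = l.find? p := by
  induction l with
  | nil => simp
  | cons x xs ih =>
    by_cases h : p x = true
    · simp [h]
    · simp only [Bool.not_eq_true] at h
      simp [h, ih]

theorem pvFind?_reverse {α : Type} (p : α → Bool) (l : List α) :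
    l.reverse.find? p = (l.filter p).getLast? := by
  rw [List.getLast?_eq_head?_reverse, ← List.filter_reverse, pvHead?_filter]

-- one-step unfolding equations for pvChop
theorem pvChop_none {cs : List Char} {fb : Option String} (h : pvRpartition cs = none) :
    pvChop cs fb =
      (if pvOk (String.ofList cs) then
        (if !pvIsVersion (String.ofList cs) then String.ofList cs else fb.getD (String.ofList cs))
       else fb.getD "resource") := by
  rw [pvChop]
  split
  · rfl
  · next _ _ heq => rw [h] at heq; cases heq

theorem pvChop_some {cs head p : List Char} {fb : Option String}
    (h : pvRpartition cs = some (head, p)) :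
    pvChop cs fb =
      (if pvOk (String.ofList p) then
        (if !pvIsVersion (String.ofList p) then String.ofList p
         else pvChop head (some (fb.getD (String.ofList p))))
       else pvChop head fb) := by
  rw [pvChop]
  split
  · next heq => rw [h] at heq; cases heq
  · next head' p' heq =>
    rw [h] at heq
    cases heq
    rfl

-- right-to-left segment view of one chop step
theorem pvSegsR_step {cs head p : List Char} (h : pvRpartition cs = some (head, p)) :
    (pvSplitAux cs []).reverse.map String.ofList
      = String.ofList p :: (pvSplitAux head []).reverse.map String.ofList := by
  obtain ⟨hcs, hnp⟩ := pvRpartition_some h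
  rw [hcs, pvSplitAux_append, pvSplitAux_no_sep p [] hnp]
  simp

-- the chop loop computes: first primary segment from the right, else fb, else the first
-- acceptable segment from the right, else 'resource'
theorem pvChop_spec_aux (n : Nat) (cs : List Char) (fb : Option String) (hn : cs.length ≤ n) :
    pvChop cs fb =
      match ((pvSplitAux cs []).reverse.map String.ofList).find? pvCondA with
      | some q => q
      | none =>
        (fb.or (((pvSplitAux cs []).reverse.map String.ofList).find? pvOk)).getD "resource" := by
  induction n generalizing cs fb with
  | zero =>
    have hcs : cs = [] := List.length_eq_zero_iff.mp (Nat.le_zero.mp hn)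
    subst hcs
    rw [pvChop_none (by rfl)]
    have h1 : pvOk "" = true := by decide
    have h2 : pvIsVersion "" = false := by decide
    have h3 : pvCondA "" = true := by decide
    cases fb <;> simp [pvSplitAux, h1, h2, h3]
  | succ n ih =>
    cases h : pvRpartition cs with
    | none =>
      rw [pvChop_none h]
      have hns : '/' ∉ cs := (pvRpartition_none_iff cs).mp h
      rw [pvSplitAux_no_sep cs [] hns]
      simp only [List.reverse_nil, List.nil_append, List.reverse_singleton, List.map_cons,
        List.map_nil]
      by_cases hok : pvOk (String.ofList cs) = true
      · by_cases hv : pvIsVersion (String.ofList cs) = true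
        · have hc : pvCondA (String.ofList cs) = false := by rw [pvCondA_eq, hok, hv]; rfl
          simp only [List.find?, hc, hok, hv, Bool.not_true, Bool.false_eq_true, reduceIte,
            if_pos]
          cases fb <;> simp [Option.or]
        · have hc : pvCondA (String.ofList cs) = true := by rw [pvCondA_eq, hok]; simp [hv]
          simp [List.find?, hc, hok, hv]
      · have hc : pvCondA (String.ofList cs) = false := by rw [pvCondA_eq]; simp [hok]
        simp only [Bool.not_eq_true] at hok
        simp only [List.find?, hc, hok, Bool.false_eq_true, reduceIte]
        cases fb <;> simp [Option.or]
    | some hp =>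
      obtain ⟨head, p⟩ := hp
      rw [pvChop_some h, pvSegsR_step h]
      have hlen : head.length ≤ n := by
        have := pvRpartition_length h
        omega
      by_cases hok : pvOk (String.ofList p) = true
      · by_cases hv : pvIsVersion (String.ofList p) = true
        · have hc : pvCondA (String.ofList p) = false := by rw [pvCondA_eq, hok, hv]; rfl
          rw [if_pos hok, if_neg (by simp [hv])]
          rw [ih head (some (fb.getD (String.ofList p))) hlen]
          simp only [List.find?, hc, hok]
          cases hf : ((pvSplitAux head []).reverse.map String.ofList).find? pvCondA with
          | some q => simp
          | none => cases fb <;> simp [Option.or]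
        · have hc : pvCondA (String.ofList p) = true := by rw [pvCondA_eq, hok]; simp [hv]
          rw [if_pos hok, if_pos (by simp [hv])]
          simp [List.find?, hc]
      · have hc : pvCondA (String.ofList p) = false := by rw [pvCondA_eq]; simp [hok]
        rw [if_neg hok]
        rw [ih head fb hlen]
        simp only [Bool.not_eq_true] at hok
        simp [List.find?, hc, hok]

-- A's two-stage body over the same segment list, in find?-form
theorem pvA_eq_find (parts : List String) :
    (let filtered := parts.foldl (fun acc part => if pvCondA part then acc ++ [part] else acc) []
     if h : filtered ≠ [] then filtered.getLast h
     else
       match parts.reverse.find? (fun part => pvOk part) with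
       | some part => part
       | none => "resource")
    = (match parts.reverse.find? pvCondA with
       | some q => q
       | none => ((none : Option String).or (parts.reverse.find? pvOk)).getD "resource") := by
  simp only [PySem.List.foldl_append_if_eq_filter, List.nil_append, pvFind?_reverse, Option.or]
  by_cases h : parts.filter pvCondA = []
  · simp only [h, ne_eq, not_true_eq_false, List.getLast?_nil, dite_false]
    rw [← pvFind?_reverse]
    cases parts.reverse.find? (fun part => pvOk part) <;> simp
  · rw [dif_pos h, List.getLast?_eq_some_getLast h]

-- ===== VERDICT (by name: the statement is the Claim_ definition above) =====
theorem extract_resource_from_path_spec : Claim_equal_extract_resource_from_path := by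
  intro path _
  unfold Spec_extract_resource_from_path extract_resource_from_path extract_resource_from_path_alt
  rw [pvChop_spec_aux (PySem.Str.stripChars path "/").toList.length _ none (Nat.le_refl _)]
  have hsplit : (PySem.Str.split? (PySem.Str.stripChars path "/") "/").getD []
      = (pvSplitAux (PySem.Str.stripChars path "/").toList []).map String.ofList := by
    simp [PySem.Str.split?, PySem.Chars.split?, pvSplitOn_eq]
  rw [pvA_eq_find ((PySem.Str.split? (PySem.Str.stripChars path "/") "/").getD [])]
  rw [hsplit, ← List.map_reverse]
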